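-- pv_equiv track=rewrite | github.com/Kyoto-01/py_mini_projects | ipv6_abbreviation/ipv6_abb.py | find_zero_sequence_hextets
-- ===== SOURCE A (Python) =====
-- def find_zero_sequence_hextets(ipv6: list[str]) -> list[dict[str: int]]:
--     ipv6 = ipv6 + ['!']  # ! indica o fim da string, para quando o último char for igual a 0
--     sequences = []
--
--     # enquanto houver valores 0 na sublista de hextets, encontre o início e o fim da primeira sequência presente
--     end = 0
--     while '0' in ipv6[end:]:
--         start = ipv6.index('0', end)
--
--         for i in range(start, len(ipv6)):
--             end = i
--             if ipv6[i] != '0':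
--                 sequences.append({'start': start, 'end': end - 1})
--                 break
--     return sequences
-- ===== SOURCE B (Python) =====
-- def find_zero_sequence_hextets(ipv6: list[str]) -> list[dict[str: int]]:
--     sequences = []
--     start = None
--     for i, h in enumerate(ipv6):
--         if h == '0':
--             if start is None:
--                 start = i
--         elif start is not None:
--             sequences.append({'start': start, 'end': i - 1})
--             start = None
--     if start is not None:
--         sequences.append({'start': start, 'end': len(ipv6) - 1})
--     return sequences
-- ===== Notes on version B (the rewrite author's own statement) =====
-- stated objective: alternative
-- what changed: Replaces the sentinel append and the repeated membership test plus index()/inner rescans over suffixes with a single linear pass that tracks the start of the current zero run.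
import Mathlib
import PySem

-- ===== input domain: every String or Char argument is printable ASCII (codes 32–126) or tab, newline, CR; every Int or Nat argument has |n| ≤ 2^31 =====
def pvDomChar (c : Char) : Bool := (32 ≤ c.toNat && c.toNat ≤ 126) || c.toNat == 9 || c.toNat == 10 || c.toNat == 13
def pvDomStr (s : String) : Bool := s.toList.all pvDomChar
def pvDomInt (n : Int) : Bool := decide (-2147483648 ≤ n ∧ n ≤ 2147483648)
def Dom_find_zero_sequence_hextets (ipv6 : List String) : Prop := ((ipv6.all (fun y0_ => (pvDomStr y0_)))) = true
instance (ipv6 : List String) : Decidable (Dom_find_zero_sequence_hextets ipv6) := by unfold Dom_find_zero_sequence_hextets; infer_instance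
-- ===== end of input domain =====

-- B replaces A's sentinel append and repeated suffix scans ('0' in xs[end:] plus xs.index) with
-- one linear pass tracking the start of the current zero run (objective: alternative algorithm).

-- ===== PORT A =====
-- inner loop: for i in range(s, len(xs)): end = i; if xs[i] != '0': break  — returns the break index (none: no break)
def pvFindBreak (xs : List String) (i : Nat) : Option Nat :=
  if h : i < xs.length then
    if xs[i] ≠ "0" then some i else pvFindBreak xs (i + 1)
  else none
termination_by xs.length - i

-- the while loop; fuel bounds the number of iterations (end strictly increases, so length + 2 always suffices)
def pvLoopA (xs : List String) (fuel e : Nat) (acc : List (List (String × Int))) : List (List (String × Int)) :=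
  match fuel with
  | 0 => acc
  | fuel + 1 =>
    -- "'0' in ipv6[end:]" then "start = ipv6.index('0', end)": index? is none exactly when the while test fails
    match PySem.List.index? (xs.drop e) "0" with
    | none => acc
    | some j =>
      let start := e + j
      match pvFindBreak xs start with
      | some i => pvLoopA xs fuel i (acc ++ [[("start", (start : Int)), ("end", (i : Int) - 1)]])
      | none => pvLoopA xs fuel (xs.length - 1) acc  -- inner for finished without break: end = len - 1

def find_zero_sequence_hextets (ipv6 : List String) : List (List (String × Int)) :=
  pvLoopA (ipv6 ++ ["!"]) (ipv6.length + 2) 0 []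

-- ===== PORT B =====
-- the single for-loop of Source B; at the end of the list the pending run is flushed with end = len - 1 = i - 1
def pvLoopB (xs : List String) (i : Nat) (start? : Option Nat) (acc : List (List (String × Int))) : List (List (String × Int)) :=
  match xs with
  | [] =>
    match start? with
    | some s => acc ++ [[("start", (s : Int)), ("end", (i : Int) - 1)]]
    | none => acc
  | h :: t =>
    if h = "0" then
      pvLoopB t (i + 1) (some (start?.getD i)) acc
    else
      match start? with
      | some s => pvLoopB t (i + 1) none (acc ++ [[("start", (s : Int)), ("end", (i : Int) - 1)]])
      | none => pvLoopB t (i + 1) none acc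

def find_zero_sequence_hextets_alt (ipv6 : List String) : List (List (String × Int)) :=
  pvLoopB ipv6 0 none []

-- ===== PRECONDITION & SPEC =====
def Spec_find_zero_sequence_hextets (ipv6 : List String) (out : List (List (String × Int))) : Prop := out = find_zero_sequence_hextets_alt ipv6
instance (ipv6 : List String) (out : List (List (String × Int))) : Decidable (Spec_find_zero_sequence_hextets ipv6 out) := by unfold Spec_find_zero_sequence_hextets; infer_instance

-- ===== CLAIM (what is proved, stated in full; the proofs are below) =====
def Claim_equal_find_zero_sequence_hextets : Prop := ∀ (ipv6 : List String), Dom_find_zero_sequence_hextets ipv6 → Spec_find_zero_sequence_hextets ipv6 (find_zero_sequence_hextets ipv6)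

-- ===== LEMMAS AND PROOFS =====

lemma pvFindBreak_some (xs : List String) (s i : Nat) (h : pvFindBreak xs s = some i) :
    s ≤ i ∧ i < xs.length ∧ xs[i]? ≠ some "0" ∧ ∀ j, s ≤ j → j < i → xs[j]? = some "0" := by
  fun_induction pvFindBreak xs s with
  | case1 s hs hne =>
    simp only [Option.some.injEq] at h
    subst h
    refine ⟨le_refl _, hs, ?_, ?_⟩
    · simp [List.getElem?_eq_getElem hs]; exact hne
    · intro j hj hji; omega
  | case2 s hs hz ih =>
    obtain ⟨h1, h2, h3, h4⟩ := ih h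
    rw [not_not] at hz
    refine ⟨by omega, h2, h3, ?_⟩
    intro j hj hji
    rcases Nat.eq_or_lt_of_le hj with rfl | hlt
    · simp [List.getElem?_eq_getElem hs, hz]
    · exact h4 j hlt hji
  | case3 s hs => simp at h

lemma pvFindBreak_none (xs : List String) (s : Nat) (h : pvFindBreak xs s = none) :
    ∀ j, s ≤ j → j < xs.length → xs[j]? = some "0" := by
  fun_induction pvFindBreak xs s with
  | case1 s hs hne => simp at h
  | case2 s hs hz ih =>
    intro j hj hjl
    rw [not_not] at hz
    rcases Nat.eq_or_lt_of_le hj with rfl | hlt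
    · simp [List.getElem?_eq_getElem hs, hz]
    · exact ih h j hlt hjl
  | case3 s hs =>
    intro j hj hjl; omega

lemma pvLoopB_skip (ys : List String) : ∀ (t : List String) (i : Nat) acc, (∀ y ∈ ys, y ≠ "0") →
    pvLoopB (ys ++ t) i none acc = pvLoopB t (i + ys.length) none acc := by
  induction ys with
  | nil => intro t i acc _; simp
  | cons y ys ih =>
    intro t i acc hy
    have hy0 : y ≠ "0" := hy y (by simp)
    simp only [List.cons_append, pvLoopB, if_neg hy0]
    rw [ih t (i + 1) acc (fun z hz => hy z (by simp [hz]))]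
    congr 1
    simp; omega

lemma pvLoopB_zeros (ys : List String) : ∀ (t : List String) (i s : Nat) acc, (∀ y ∈ ys, y = "0") →
    pvLoopB (ys ++ t) i (some s) acc = pvLoopB t (i + ys.length) (some s) acc := by
  induction ys with
  | nil => intro t i s acc _; simp
  | cons y ys ih =>
    intro t i s acc hy
    have hy0 : y = "0" := hy y (by simp)
    simp only [List.cons_append, pvLoopB, if_pos hy0, Option.getD_some]
    rw [ih t (i + 1) s acc (fun z hz => hy z (by simp [hz]))]
    congr 1
    simp; omega

lemma pvLoopB_sentinel (t : List String) : ∀ (i : Nat) (start? : Option Nat) acc,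
    pvLoopB (t ++ ["!"]) i start? acc = pvLoopB t i start? acc := by
  induction t with
  | nil =>
    intro i start? acc
    cases start? with
    | none => simp [pvLoopB]
    | some s => simp [pvLoopB]
  | cons h t ih =>
    intro i start? acc
    by_cases hz : h = "0"
    · simp only [List.cons_append, pvLoopB, if_pos hz]; exact ih _ _ _
    · simp only [List.cons_append, pvLoopB, if_neg hz]
      cases start? with
      | none => exact ih _ _ _
      | some s => exact ih _ _ _

lemma pvLoopA_eq (xs : List String)
    (hlast : ∀ (_ : 0 < xs.length), xs[xs.length - 1]? ≠ some "0") :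
    ∀ (fuel e : Nat) acc, xs.length < e + fuel →
    pvLoopA xs fuel e acc = pvLoopB (xs.drop e) e none acc := by
  intro fuel
  induction fuel with
  | zero =>
    intro e acc hf
    have : xs.drop e = [] := List.drop_eq_nil_of_le (by omega)
    simp [pvLoopA, this, pvLoopB]
  | succ fuel ih =>
    intro e acc hf
    rcases hidx : PySem.List.index? (xs.drop e) "0" with _ | j
    · -- no '0' left: while exits; B skips the rest emitting nothing
      have hnomem : "0" ∉ xs.drop e := (PySem.List.index?_eq_none_iff _ _).mp hidx
      have hskip := pvLoopB_skip (xs.drop e) [] e acc (fun y hy => fun hc => hnomem (hc ▸ hy))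
      simp only [List.append_nil] at hskip
      rw [PySem.List.index?_eq_idxOf?] at hidx
      simp [pvLoopA, hidx, hskip, pvLoopB]
    · obtain ⟨hjlen, hjget, hjmin⟩ := PySem.List.getElem_of_index?_eq_some hidx
      have hjd : (xs.drop e).length = xs.length - e := List.length_drop ..
      have hstartlen : e + j < xs.length := by omega
      have hstart0 : xs[e + j]? = some "0" := by
        rw [List.getElem?_eq_getElem hstartlen]
        rw [← hjget]
        exact congrArg some (List.getElem_drop ..).symm
      rcases hbr : pvFindBreak xs (e + j) with _ | i
      · -- inner loop never breaks: everything from e+j on is "0", contradicting the last element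
        exfalso
        have hall := pvFindBreak_none xs (e + j) hbr
        have hl : xs[xs.length - 1]? = some "0" := hall (xs.length - 1) (by omega) (by omega)
        exact hlast (by omega) hl
      · obtain ⟨hsi, hilen, hine, hzrun⟩ := pvFindBreak_some xs (e + j) i hbr
        have hii : e + j < i := by
          rcases Nat.eq_or_lt_of_le hsi with heq | h; · exact absurd (heq ▸ hstart0) hine
          · exact h
        -- LHS: one while iteration then IH
        have hLHS : pvLoopA xs (fuel + 1) e acc
            = pvLoopA xs fuel i (acc ++ [[("start", ((e + j : Nat) : Int)), ("end", (i : Int) - 1)]]) := by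
          conv_lhs => rw [pvLoopA]
          rw [hidx]
          simp [hbr]
        -- RHS: skip the non-'0' prefix, open the run, cross the zeros, close at i
        have hdrop1 : xs.drop e = (xs.drop e).take j ++ xs.drop (e + j) := by
          conv_lhs => rw [← List.take_append_drop j (xs.drop e)]
          rw [List.drop_drop]
        have hpre : ∀ y ∈ (xs.drop e).take j, y ≠ "0" := by
          intro y hy
          obtain ⟨m, hm, hmy⟩ := List.getElem_of_mem hy
          have hmj : m < j := by
            have := List.length_take_le j (xs.drop e)
            have h2 : ((xs.drop e).take j).length = min j (xs.drop e).length := List.length_take ..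
            omega
          have : ((xs.drop e).take j)[m] = (xs.drop e)[m]'(by omega) := List.getElem_take ..
          rw [← hmy, this]
          exact hjmin m hmj
        have hlen_take : ((xs.drop e).take j).length = j := by
          rw [List.length_take]; omega
        have hdropstart : xs.drop (e + j) = "0" :: xs.drop (e + j + 1) := by
          rw [List.drop_eq_getElem_cons hstartlen]
          congr 1
          have := List.getElem?_eq_getElem hstartlen
          rw [this] at hstart0
          exact Option.some.inj hstart0
        have hdrop2 : xs.drop (e + j + 1) = (xs.drop (e + j + 1)).take (i - (e + j + 1)) ++ xs.drop i := by
          conv_lhs => rw [← List.take_append_drop (i - (e + j + 1)) (xs.drop (e + j + 1))]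
          rw [List.drop_drop]
          congr 2
          omega
        have hzs : ∀ y ∈ (xs.drop (e + j + 1)).take (i - (e + j + 1)), y = "0" := by
          intro y hy
          obtain ⟨m, hm, hmy⟩ := List.getElem_of_mem hy
          have hmlt : m < i - (e + j + 1) := by
            have h2 : ((xs.drop (e + j + 1)).take (i - (e + j + 1))).length
                = min (i - (e + j + 1)) (xs.drop (e + j + 1)).length := List.length_take ..
            omega
          have hmlen : e + j + 1 + m < xs.length := by omega
          have hmd : m < (xs.drop (e + j + 1)).length := by
            rw [List.length_drop]; omega
          have hg : ((xs.drop (e + j + 1)).take (i - (e + j + 1)))[m] = (xs.drop (e + j + 1))[m]'hmd := List.getElem_take ..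
          have hg2 : (xs.drop (e + j + 1))[m]'hmd = xs[e + j + 1 + m]'hmlen := List.getElem_drop ..
          have := hzrun (e + j + 1 + m) (by omega) (by omega)
          rw [List.getElem?_eq_getElem hmlen] at this
          rw [← hmy, hg, hg2]
          exact Option.some.inj this
        have hlen_take2 : ((xs.drop (e + j + 1)).take (i - (e + j + 1))).length = i - (e + j + 1) := by
          rw [List.length_take]
          have := List.length_drop (i := e + j + 1) (l := xs)
          omega
        have hdropi : xs.drop i = xs[i] :: xs.drop (i + 1) := List.drop_eq_getElem_cons hilen
        have hine' : xs[i] ≠ "0" := by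
          rw [List.getElem?_eq_getElem hilen] at hine
          intro hc; exact hine (by rw [hc])
        rw [hLHS, ih i _ (by omega)]
        refine Eq.symm ?_
        calc pvLoopB (xs.drop e) e none acc
            = pvLoopB (xs.drop (e + j)) (e + j) none acc := by
              rw [hdrop1, pvLoopB_skip _ _ _ _ hpre, hlen_take]
          _ = pvLoopB (xs.drop (e + j + 1)) (e + j + 1) (some (e + j)) acc := by
              rw [hdropstart]; simp [pvLoopB]
          _ = pvLoopB (xs.drop i) i (some (e + j)) acc := by
              rw [hdrop2, pvLoopB_zeros _ _ _ _ _ hzs, hlen_take2]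
              congr 1
              omega
          _ = pvLoopB (xs.drop (i + 1)) (i + 1) none (acc ++ [[("start", ((e + j : Nat) : Int)), ("end", (i : Int) - 1)]]) := by
              rw [hdropi]; simp [pvLoopB, hine']
          _ = pvLoopB (xs.drop i) i none (acc ++ [[("start", ((e + j : Nat) : Int)), ("end", (i : Int) - 1)]]) := by
              rw [hdropi]; simp [pvLoopB, hine']

-- ===== VERDICT (by name: the statement is the Claim_ definition above) =====
theorem find_zero_sequence_hextets_spec : Claim_equal_find_zero_sequence_hextets := by
  intro ipv6 _
  unfold Spec_find_zero_sequence_hextets find_zero_sequence_hextets find_zero_sequence_hextets_alt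
  have hlast : ∀ (_ : 0 < (ipv6 ++ ["!"]).length),
      (ipv6 ++ ["!"])[(ipv6 ++ ["!"]).length - 1]? ≠ some "0" := by
    intro _
    have : (ipv6 ++ ["!"]).length - 1 = ipv6.length := by simp
    rw [this, List.getElem?_concat_length]
    simp
  rw [pvLoopA_eq (ipv6 ++ ["!"]) hlast (ipv6.length + 2) 0 [] (by simp)]
  simp only [List.drop_zero]
  exact pvLoopB_sentinel ipv6 0 none []
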